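-- pv_equiv track=rewrite | github.com/Lightblues/Leetcode | contest/d051-100/d100.py | maximizeGreatness
-- ===== SOURCE A (Python) =====
-- from typing import List
--
-- def maximizeGreatness(nums: List[int]) -> int:
--     nums.sort()
--     ans = 0
--     # for i in range(1, len(nums)):
--     #     ans += nums[i]>nums[i-1]
--     n = len(nums)
--     i = 0
--     for j in range(1, n):
--         if nums[j]>nums[i]:
--             ans += 1
--             i += 1
--     return ans
-- ===== SOURCE B (Python) =====
-- def maximizeGreatness(nums):
--     # Same return value as A; keeps A's in-place sort side effect.
--     nums.sort()
--     best = 0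
--     cur = 0
--     prev = None
--     for x in nums:
--         if cur > 0 and x == prev:
--             cur += 1
--         else:
--             cur = 1
--         prev = x
--         if cur > best:
--             best = cur
--     return len(nums) - best
-- ===== Notes on version B (the rewrite author's own statement) =====
-- stated objective: simpler
-- what changed: Replaces the two-pointer greedy over the sorted array by a single run-length pass that finds the maximum multiplicity m and returns len(nums) - m.
import Mathlib
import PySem

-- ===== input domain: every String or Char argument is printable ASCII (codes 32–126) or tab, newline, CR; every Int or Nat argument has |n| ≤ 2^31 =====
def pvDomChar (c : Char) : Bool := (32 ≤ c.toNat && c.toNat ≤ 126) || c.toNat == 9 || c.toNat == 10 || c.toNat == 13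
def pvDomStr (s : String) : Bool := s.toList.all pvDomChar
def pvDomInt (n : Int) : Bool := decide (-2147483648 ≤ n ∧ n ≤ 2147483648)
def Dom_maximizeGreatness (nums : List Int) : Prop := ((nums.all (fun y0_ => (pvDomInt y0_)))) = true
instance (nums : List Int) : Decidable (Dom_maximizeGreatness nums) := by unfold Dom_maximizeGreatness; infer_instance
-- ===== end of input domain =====

-- B replaces A's two-pointer greedy on the sorted list by a single run-length pass
-- (longest run of equal elements = max multiplicity m) returning len - m; simpler.
-- Both Pythons sort the argument in place; the equivalence proved is about the return value
-- (B performs the same in-place sort, so the mutation side effect is identical).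

-- ===== PORT A =====
-- Indices i and j always satisfy 0 ≤ i < j < len(s), so pyGetD with default 0 is exact here.
def maximizeGreatness (nums : List Int) : Int :=
  let s := PySem.List.sorted nums (fun x => x) false
  let n : Int := PySem.List.len s
  let res := (PySem.List.pyRange 1 n 1).foldl
    (fun (st : Int × Int) j =>
      if PySem.List.pyGetD s st.2 0 < PySem.List.pyGetD s j 0 then (st.1 + 1, st.2 + 1) else st)
    (0, 0)
  res.1

-- ===== PORT B =====
-- state = (prev : Option Int, cur : Int, best : Int); Python's `x == prev` with prev = None is False.
def maximizeGreatness_alt (nums : List Int) : Int :=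
  let s := PySem.List.sorted nums (fun x => x) false
  let st := s.foldl
    (fun (st : Option Int × Int × Int) x =>
      let cur : Int := match st.1 with
        | some p => if 0 < st.2.1 ∧ x = p then st.2.1 + 1 else 1
        | none => 1
      let best : Int := if st.2.2 < cur then cur else st.2.2
      (some x, cur, best))
    (none, 0, 0)
  PySem.List.len nums - st.2.2

-- ===== PRECONDITION & SPEC =====
def Spec_maximizeGreatness (nums : List Int) (out : Int) : Prop := out = maximizeGreatness_alt nums
instance (nums : List Int) (out : Int) : Decidable (Spec_maximizeGreatness nums out) := by unfold Spec_maximizeGreatness; infer_instance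

-- ===== CLAIM (what is proved, stated in full; the proofs are below) =====
def Claim_equal_maximizeGreatness : Prop := ∀ (nums : List Int), Dom_maximizeGreatness nums → Spec_maximizeGreatness nums (maximizeGreatness nums)

-- ===== LEMMAS AND PROOFS =====

-- the two loop bodies, named for the proofs (definitionally the lambdas in the ports)
def pvStepA (s : List Int) (st : Int × Int) (j : Int) : Int × Int :=
  if PySem.List.pyGetD s st.2 0 < PySem.List.pyGetD s j 0 then (st.1 + 1, st.2 + 1) else st

def pvStepB (st : Option Int × Int × Int) (x : Int) : Option Int × Int × Int :=
  let cur : Int := match st.1 with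
    | some p => if 0 < st.2.1 ∧ x = p then st.2.1 + 1 else 1
    | none => 1
  let best : Int := if st.2.2 < cur then cur else st.2.2
  (some x, cur, best)

def pvG (s : List Int) (m : Nat) : Int := s.getD m 0

lemma pvG_eq_getElem (s : List Int) (m : Nat) (h : m < s.length) : pvG s m = s[m] := by
  simp [pvG, List.getD_eq_getElem?_getD, List.getElem?_eq_getElem h]

lemma pvMono (s : List Int) (hp : s.Pairwise (· ≤ ·)) (a b : Nat) (hab : a ≤ b)
    (hb : b < s.length) : pvG s a ≤ pvG s b := by
  rcases Nat.lt_or_ge a b with h | h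
  · rw [pvG_eq_getElem s a (lt_trans h hb), pvG_eq_getElem s b hb]
    exact List.pairwise_iff_getElem.mp hp a b (lt_trans h hb) hb h
  · have : a = b := le_antisymm hab h
    simp [this]

lemma pvStepB_some (p cur best x : Int) :
    pvStepB (some p, cur, best) x =
      (some x, (if 0 < cur ∧ x = p then cur + 1 else 1),
        if best < (if 0 < cur ∧ x = p then cur + 1 else 1)
        then (if 0 < cur ∧ x = p then cur + 1 else 1) else best) := rfl

lemma pvInv (s : List Int) (hp : s.Pairwise (· ≤ ·)) :
    ∀ k : Nat, 1 ≤ k → k ≤ s.length →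
    ∃ r best : Nat,
      (s.take k).foldl pvStepB (none, 0, 0)
        = (some (pvG s (k - 1)), (r : Int), (best : Int)) ∧
      (PySem.List.pyRange 1 (k : Int) 1).foldl (pvStepA s) (0, 0)
        = ((k : Int) - best, (k : Int) - best) ∧
      1 ≤ r ∧ r ≤ best ∧ best ≤ k ∧
      (∀ m : Nat, k - r ≤ m → m < k → pvG s m = pvG s (k - 1)) ∧
      (r < k → pvG s (k - r - 1) < pvG s (k - 1)) := by
  intro k
  induction k with
  | zero => omega
  | succ k ih =>
    intro _ hk1
    rcases Nat.eq_zero_or_pos k with hk0 | hkpos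
    · -- base case k+1 = 1
      subst hk0
      refine ⟨1, 1, ?_, ?_, by omega, by omega, by omega, ?_, by omega⟩
      · have h0 : 0 < s.length := hk1
        rw [List.take_add_one, List.take_zero, List.getElem?_eq_getElem h0]
        simp [pvStepB, pvG_eq_getElem s 0 h0]
      · rw [PySem.List.pyRange_one_eq_nil (by norm_num)]
        simp
      · intro m _ hm
        have : m = 0 := by omega
        simp [this]
    · -- inductive step
      obtain ⟨r, best, hB, hA, hr1, hrb, hbk, hrun, hprev⟩ := ih hkpos (by omega)
      have hklen : k < s.length := by omega
      -- unfold one more element on both sides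
      have htake : s.take (k + 1) = s.take k ++ [pvG s k] := by
        rw [List.take_add_one, List.getElem?_eq_getElem hklen, pvG_eq_getElem s k hklen]
        rfl
      have hBstep : (s.take (k + 1)).foldl pvStepB (none, 0, 0)
          = pvStepB ((s.take k).foldl pvStepB (none, 0, 0)) (pvG s k) := by
        rw [htake, List.foldl_append]; rfl
      have hrange : PySem.List.pyRange 1 ((k : Int) + 1) 1
          = PySem.List.pyRange 1 (k : Int) 1 ++ [(k : Int)] :=
        PySem.List.pyRange_one_succ_right (by exact_mod_cast hkpos)
      have hAstep : (PySem.List.pyRange 1 ((k + 1 : Nat) : Int) 1).foldl (pvStepA s) (0, 0)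
          = pvStepA s ((PySem.List.pyRange 1 (k : Int) 1).foldl (pvStepA s) (0, 0)) (k : Int) := by
        push_cast
        rw [hrange, List.foldl_append]; rfl
      have h01 : (0 : Int) < (r : Int) := by exact_mod_cast hr1
      -- A's pointer value: s[k - best]
      have hcast : ((k : Int) - best) = (((k - best : Nat)) : Int) := by
        push_cast [Nat.cast_sub (by omega : best ≤ k)]; ring
      have hgetA : PySem.List.pyGetD s ((k : Int) - best) 0 = pvG s (k - best) := by
        rw [hcast, PySem.List.pyGetD_natCast]; rfl
      have hgetk : PySem.List.pyGetD s (k : Int) 0 = pvG s k := by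
        rw [PySem.List.pyGetD_natCast]; rfl
      by_cases hc : pvG s k = pvG s (k - 1) ∧ r = best
      · -- run extends and was already the maximum: best grows, A does not count
        obtain ⟨heq, hre⟩ := hc
        have hAcond : ¬ (PySem.List.pyGetD s ((k : Int) - best) 0 < PySem.List.pyGetD s (k : Int) 0) := by
          rw [hgetA, hgetk]
          have h1 : pvG s (k - best) = pvG s (k - 1) := hrun (k - best) (by omega) (by omega)
          rw [h1, ← heq]
          simp
        refine ⟨r + 1, best + 1, ?_, ?_, by omega, by omega, by omega, ?_, ?_⟩
        · rw [hBstep, hB, pvStepB_some]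
          have hcond : (0 : Int) < (r : Int) ∧ pvG s k = pvG s (k - 1) := ⟨h01, heq⟩
          rw [if_pos hcond]
          rw [if_pos (show (best : Int) < (r : Int) + 1 by omega)]
          simp only [Nat.add_sub_cancel, Prod.mk.injEq]
          exact ⟨trivial, by push_cast; ring, by omega⟩
        · rw [hAstep, hA]
          simp only [pvStepA]
          rw [if_neg hAcond]
          simp only [Prod.mk.injEq]
          constructor <;> push_cast <;> ring
        · intro m hm1 hm2
          simp only [Nat.add_sub_cancel]
          rcases Nat.lt_or_ge m k with h | h
          · rw [hrun m (by omega) h, heq]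
          · have : m = k := by omega
            rw [this]
        · intro hlt
          simp only [Nat.add_sub_cancel]
          have h1 : k + 1 - (r + 1) - 1 = k - r - 1 := by omega
          rw [h1]
          exact lt_of_lt_of_le (hprev (by omega)) (le_of_eq heq.symm)
      · -- best stays; A counts one more
        have hAcond : PySem.List.pyGetD s ((k : Int) - best) 0 < PySem.List.pyGetD s (k : Int) 0 := by
          rw [hgetA, hgetk]
          have hk1len : k - 1 < s.length := by omega
          have hle1 : pvG s (k - best) ≤ pvG s (k - 1) := pvMono s hp _ _ (by omega) hk1len
          have hle2 : pvG s (k - 1) ≤ pvG s k := pvMono s hp _ _ (by omega) hklen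
          rcases not_and_or.mp hc with hne | hne
          · -- last element strictly larger than the previous one
            have : pvG s (k - 1) < pvG s k := lt_of_le_of_ne hle2 (fun h => hne h.symm)
            exact lt_of_le_of_lt hle1 this
          · -- r < best: the pointer sits strictly before the trailing run
            have hrlb : r < best := lt_of_le_of_ne hrb hne
            have hstep : pvG s (k - best) ≤ pvG s (k - r - 1) := pvMono s hp _ _ (by omega) (by omega)
            have : pvG s (k - best) < pvG s (k - 1) := lt_of_le_of_lt hstep (hprev (by omega))
            exact lt_of_lt_of_le this hle2
        refine ⟨(if pvG s k = pvG s (k - 1) then r + 1 else 1), best, ?_, ?_, ?_, ?_, by omega, ?_, ?_⟩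
        · rw [hBstep, hB, pvStepB_some]
          by_cases heq : pvG s k = pvG s (k - 1)
          · have hrlb : r < best := by
              rcases not_and_or.mp hc with h | h
              · exact absurd heq h
              · exact lt_of_le_of_ne hrb h
            have hcond : (0 : Int) < (r : Int) ∧ pvG s k = pvG s (k - 1) := ⟨h01, heq⟩
            rw [if_pos hcond]
            rw [if_neg (show ¬ ((best : Int) < (r : Int) + 1) by omega)]
            simp only [Nat.add_sub_cancel, Prod.mk.injEq, if_pos heq]
            exact ⟨trivial, by push_cast; ring, trivial⟩
          · have hne : ¬ ((0 : Int) < (r : Int) ∧ pvG s k = pvG s (k - 1)) := fun h => heq h.2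
            rw [if_neg hne]
            rw [if_neg (show ¬ ((best : Int) < (1 : Int)) by omega)]
            simp only [Nat.add_sub_cancel, Prod.mk.injEq, if_neg heq]
            exact ⟨trivial, by norm_num, trivial⟩
        · rw [hAstep, hA]
          simp only [pvStepA]
          rw [if_pos hAcond]
          simp only [Prod.mk.injEq]
          constructor <;> push_cast <;> ring
        · split <;> omega
        · split
          · next heq =>
            rcases not_and_or.mp hc with h | h
            · exact absurd heq h
            · omega
          · omega
        · intro m hm1 hm2
          simp only [Nat.add_sub_cancel]
          by_cases heq : pvG s k = pvG s (k - 1)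
          · rw [if_pos heq] at hm1
            rcases Nat.lt_or_ge m k with h | h
            · rw [hrun m (by omega) h, heq]
            · have hmk : m = k := by omega
              rw [hmk]
          · rw [if_neg heq] at hm1
            have hmk : m = k := by omega
            rw [hmk]
        · intro hlt
          simp only [Nat.add_sub_cancel]
          split
          · next heq =>
            rw [if_pos heq] at hlt
            have h1 : k + 1 - (r + 1) - 1 = k - r - 1 := by omega
            rw [h1]
            exact lt_of_lt_of_le (hprev (by omega)) (le_of_eq heq.symm)
          · next heq =>
            have h1 : k + 1 - 1 - 1 = k - 1 := by omega
            rw [h1]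
            have hle : pvG s (k - 1) ≤ pvG s k := pvMono s hp _ _ (by omega) hklen
            exact lt_of_le_of_ne hle (fun h => heq h.symm)

theorem maximizeGreatness_spec : Claim_equal_maximizeGreatness := by
  intro nums _
  unfold Spec_maximizeGreatness maximizeGreatness maximizeGreatness_alt
  set s := PySem.List.sorted nums (fun x => x) false with hs
  have hp : s.Pairwise (· ≤ ·) := PySem.List.sorted_pairwise nums (fun x => x)
  have hlen : s.length = nums.length := by
    rw [hs]; exact (PySem.List.sorted_perm nums (fun x => x) false).length_eq
  rcases Nat.eq_zero_or_pos s.length with h0 | hpos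
  · -- empty list: both loops are vacuous
    have hsnil : s = [] := List.eq_nil_of_length_eq_zero h0
    have hnil : nums = [] := List.eq_nil_of_length_eq_zero (by omega)
    simp [hsnil, hnil, PySem.List.len, PySem.List.pyRange_one_eq_nil]
  · obtain ⟨r, best, hB, hA, _, _, hbk, _, _⟩ := pvInv s hp s.length hpos le_rfl
    have htk : s.take s.length = s := List.take_length
    rw [htk] at hB
    simp only [PySem.List.len_eq]
    show ((PySem.List.pyRange 1 (s.length : Int) 1).foldl (pvStepA s) (0, 0)).1
        = (nums.length : Int) - (s.foldl pvStepB (none, 0, 0)).2.2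
    rw [hA, hB, ← hlen]
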